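-- pv_equiv track=rewrite | github.com/MDzer0/atcoder | submissions/code-festival-2014-final/c.py | f
-- ===== SOURCE A (Python) =====
-- def f(n):
--     r = 0
--     tmp = n
--     base = 1
--     while tmp != 0:
--         r += (tmp % 10) * base
--         base *= n
--         tmp //= 10
--     return r
-- ===== SOURCE B (Python) =====
-- def f(n):
--     r = 0
--     for c in str(n):
--         r = r * n + int(c)
--     return r
-- ===== Notes on version B (the rewrite author's own statement) =====
-- stated objective: simpler
-- what changed: Replaces the incremental-power accumulation over least-significant digits (tmp %10 // 10 with a running base) by Horner's rule over the decimal string of n, most-significant digit first.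
import Mathlib
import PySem

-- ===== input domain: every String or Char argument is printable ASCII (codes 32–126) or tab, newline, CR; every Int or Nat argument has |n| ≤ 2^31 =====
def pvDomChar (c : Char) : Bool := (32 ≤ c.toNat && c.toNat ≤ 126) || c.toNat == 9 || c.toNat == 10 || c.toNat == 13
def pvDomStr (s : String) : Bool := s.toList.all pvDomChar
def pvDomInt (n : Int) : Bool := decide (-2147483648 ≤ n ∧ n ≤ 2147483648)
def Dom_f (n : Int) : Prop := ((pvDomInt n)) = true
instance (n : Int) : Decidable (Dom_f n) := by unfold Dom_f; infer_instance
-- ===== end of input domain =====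

-- B replaces A's least-significant-first digit loop with a running power of n by
-- Horner's rule over str(n), most-significant digit first (objective: simpler).

-- ===== PORT A =====
-- A's while-loop; the fuel argument only makes the loop total (on negative n the
-- Python loop never terminates; such n are excluded by Pre_f), for 0 ≤ n the fuel
-- n.toNat + 1 is never exhausted and the recursion is exactly A's loop body.
def fLoop (fuel : Nat) (tmp r base n : Int) : Int :=
  match fuel with
  | 0 => r
  | fuel + 1 =>
    if tmp ≠ 0 then
      fLoop fuel (PySem.Int.floordiv tmp 10) (r + PySem.Int.mod tmp 10 * base) (base * n) n
    else r

def f (n : Int) : Int := fLoop (n.toNat + 1) n 0 1 n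

-- ===== PORT B =====
-- int(c) on a one-character string; the .getD 0 only totalises the ValueError case
-- (the '-' of a negative n), which lies outside Pre_f.
def intOfChar (c : Char) : Int := (PySem.Int.ofChars? [c]).getD 0

def f_alt (n : Int) : Int :=
  (PySem.Int.toChars n).foldl (fun r c => r * n + intOfChar c) 0

-- ===== PRECONDITION & SPEC =====
-- Pre_f excludes exactly the negative n, on which A's while-loop never terminates
-- (tmp //= 10 converges to -1, never 0), so A returns no value there.
def Pre_f (n : Int) : Prop := 0 ≤ n
instance (n : Int) : Decidable (Pre_f n) := by unfold Pre_f; infer_instance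

def pvWitness_f : Int := 37

def Spec_f (n : Int) (out : Int) : Prop := out = f_alt n
instance (n : Int) (out : Int) : Decidable (Spec_f n out) := by unfold Spec_f; infer_instance

-- ===== CLAIM (what is proved, stated in full; the proofs are below) =====
def Claim_equal_f : Prop := ∀ (n : Int), Dom_f n → Pre_f n → Spec_f n (f n)

-- ===== LEMMAS AND PROOFS =====

-- the common value Σ dᵢ(m)·nⁱ of both programs, by recursion on m
def polyVal (n : Int) (m : Nat) : Int :=
  if m = 0 then 0 else (m % 10 : Nat) + n * polyVal n (m / 10)
decreasing_by exact Nat.div_lt_self (Nat.pos_of_ne_zero (by assumption)) (by norm_num)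

-- digits of m, most significant first, as characters (mirrors Nat.toDigitsCore's output)
def digitsMSB (m : Nat) : List Char :=
  if m < 10 then [Nat.digitChar m]
  else digitsMSB (m / 10) ++ [Nat.digitChar (m % 10)]
decreasing_by exact Nat.div_lt_self (by omega) (by norm_num)

lemma toDigitsCore_eq (fuel : Nat) : ∀ (m : Nat) (ds : List Char), m < fuel →
    Nat.toDigitsCore 10 fuel m ds = digitsMSB m ++ ds := by
  induction fuel with
  | zero => intro m ds h; omega
  | succ fuel ih =>
    intro m ds h
    rw [Nat.toDigitsCore]
    by_cases h10 : m < 10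
    · have h0 : m / 10 = 0 := Nat.div_eq_of_lt h10
      rw [if_pos h0, digitsMSB, if_pos h10, Nat.mod_eq_of_lt h10]
      simp
    · have hdiv : m / 10 ≠ 0 := by
        intro hz; exact h10 (by omega)
      have hlt : m / 10 < fuel := by
        have := Nat.div_lt_self (show 0 < m by omega) (show 1 < 10 by norm_num)
        omega
      rw [if_neg hdiv, ih _ _ hlt]
      conv_rhs => rw [digitsMSB, if_neg h10]
      simp

lemma toChars_nonneg (n : Int) (h : 0 ≤ n) :
    PySem.Int.toChars n = digitsMSB n.toNat := by
  rw [PySem.Int.toChars, if_neg (by omega), Nat.toDigits,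
      toDigitsCore_eq _ _ _ (Nat.lt_succ_self _), List.append_nil]

lemma intOfChar_digitChar (d : Nat) (h : d < 10) :
    intOfChar (Nat.digitChar d) = (d : Int) := by
  interval_cases d <;> decide

-- Horner invariant for B: folding over the MSB-first digits of m
lemma horner_digitsMSB (n : Int) (m : Nat) : ∀ (r : Int),
    (digitsMSB m).foldl (fun r c => r * n + intOfChar c) r
      = r * n ^ (digitsMSB m).length + polyVal n m := by
  induction m using Nat.strong_induction_on with
  | _ m ih =>
    intro r
    by_cases h10 : m < 10
    · rw [digitsMSB, if_pos h10]
      simp only [List.foldl, List.length, pow_one, zero_add,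
        pow_one]
      rw [intOfChar_digitChar m h10]
      by_cases hz : m = 0
      · subst hz; simp [polyVal]
      · rw [polyVal, if_neg hz, Nat.div_eq_of_lt h10, polyVal]
        simp [Nat.mod_eq_of_lt h10]
    · rw [digitsMSB, if_neg h10]
      have hlt : m / 10 < m := Nat.div_lt_self (by omega) (by norm_num)
      rw [List.foldl_append, ih _ hlt r]
      simp only [List.foldl]
      rw [intOfChar_digitChar (m % 10) (Nat.mod_lt _ (by norm_num))]
      conv_rhs => rw [polyVal, if_neg (show ¬ m = 0 by omega)]
      rw [List.length_append, List.length_cons, List.length_nil]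
      ring

lemma f_alt_eq_polyVal (n : Int) (h : 0 ≤ n) : f_alt n = polyVal n n.toNat := by
  rw [f_alt, toChars_nonneg n h, horner_digitsMSB]
  simp

-- A-side loop invariant
lemma fLoop_eq (n : Int) (fuel : Nat) : ∀ (m : Nat) (r base : Int), m < fuel →
    fLoop fuel (m : Int) r base n = r + base * polyVal n m := by
  induction fuel with
  | zero => intro m r base h; omega
  | succ fuel ih =>
    intro m r base h
    rw [fLoop]
    by_cases hz : m = 0
    · subst hz; simp [polyVal]
    · rw [if_pos (by exact_mod_cast hz)]
      have hmod : PySem.Int.mod (m : Int) 10 = ((m % 10 : Nat) : Int) := by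
        rw [PySem.Int.mod, Int.fmod_eq_emod, if_pos (Or.inl (by omega))]
        omega
      have hdiv : PySem.Int.floordiv (m : Int) 10 = ((m / 10 : Nat) : Int) := by
        rw [PySem.Int.floordiv, Int.fdiv_eq_ediv, if_pos (Or.inl (by omega))]
        omega
      have hlt : m / 10 < fuel := by
        have := Nat.div_lt_self (show 0 < m by omega) (show 1 < 10 by norm_num)
        omega
      rw [hmod, hdiv, ih _ _ _ hlt]
      conv_rhs => rw [polyVal, if_neg hz]
      ring

-- ===== VERDICT (by name: the statement is the Claim_ definition above) =====
theorem f_spec : Claim_equal_f := by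
  intro n _ hpre
  have hp : (0 : Int) ≤ n := hpre
  show f n = f_alt n
  rw [f_alt_eq_polyVal n hp, f]
  have hn : n = ((n.toNat : Nat) : Int) := by omega
  rw [show fLoop (n.toNat + 1) n 0 1 n = fLoop (n.toNat + 1) ((n.toNat : Nat) : Int) 0 1 n by rw [← hn]]
  rw [fLoop_eq n (n.toNat + 1) n.toNat 0 1 (Nat.lt_succ_self _)]
  ring
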